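-- pv_equiv track=rewrite | github.com/AI4Green/AI4Green | Webapp/sources/services/retrosynthesis/predictive_chemistry/compounds.py | fix_carbonates
-- ===== SOURCE A (Python) =====
-- def fix_carbonates(compound_smiles: str) -> str:
--     """
--     Fixes an issue where carbonates are returned from the conditions missing one of the counterions
--     For example, NaCO3  --> Na2CO3 and KCO3 -> K2CO3 for sodium/potassium carbonate
--     Args:
--         compound_smiles - the SMILES string for the compound being fixed
--     Returns:
--         The reformed SMILES string to return a neutral carbonate species
--     """
--     carbonate = "O=C([O-])[O-]"
--     compounds = compound_smiles.split(".")
--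
--     previous_compound = ""
--     for idx, compound in enumerate(compounds):
--         if previous_compound == carbonate:
--             counter_ion = compound
--             # Add a second counter ion to the string after the ion pattern
--             compounds.insert(idx + 1, counter_ion)
--             break
--         previous_compound = compound
--
--     # Join the modified compounds back into a single SMILES string
--     new_compound_smiles = ".".join(compounds)
--     return new_compound_smiles
-- ===== SOURCE B (Python) =====
-- def fix_carbonates(compound_smiles: str) -> str:
--     """Stream over the raw SMILES string with str.partition: copy dot-separated
--     components into an output accumulator one by one; at the first carbonate
--     component that has a successor, emit that successor twice and stop.
--     No list is ever built."""
--     carbonate = "O=C([O-])[O-]"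
--     done = ""
--     rest = compound_smiles
--     while True:
--         head, sep, tail = rest.partition(".")
--         if sep == "":
--             return done + rest
--         if head == carbonate:
--             nxt, sep2, more = tail.partition(".")
--             return done + head + "." + nxt + "." + nxt + sep2 + more
--         done = done + head + "."
--         rest = tail
-- ===== Notes on version B (the rewrite author's own statement) =====
-- stated objective: alternative
-- what changed: B never builds the component list: instead of A's split-into-list, enumerate with a previous/current pointer, in-place insert and re-join, B streams over the raw string with str.partition, copying components into a string accumulator and, at the first carbonate component that has a successor, emitting that successor twice and stopping.
import Mathlib
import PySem

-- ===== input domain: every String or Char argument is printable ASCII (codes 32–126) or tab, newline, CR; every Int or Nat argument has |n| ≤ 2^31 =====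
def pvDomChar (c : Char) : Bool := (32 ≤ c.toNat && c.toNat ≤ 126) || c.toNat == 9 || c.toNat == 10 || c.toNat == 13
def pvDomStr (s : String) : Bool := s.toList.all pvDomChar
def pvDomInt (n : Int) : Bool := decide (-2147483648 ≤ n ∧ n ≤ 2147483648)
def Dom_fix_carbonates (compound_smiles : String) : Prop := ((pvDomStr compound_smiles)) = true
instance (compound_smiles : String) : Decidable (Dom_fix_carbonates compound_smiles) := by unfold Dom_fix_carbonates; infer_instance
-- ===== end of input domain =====

-- B streams over the raw string with partition('.') and a string accumulator instead of
-- A's split-into-list / enumerate / in-place insert / re-join (objective: alternative).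


-- ===== PORT A =====
-- the 'for idx, compound in enumerate(compounds): …' loop of A (break = return)
def fixCarbLoop (compounds : List String) : List (Int × String) → String → List String
  | [], _ => compounds
  | (idx, compound) :: rest, previous_compound =>
    if previous_compound == "O=C([O-])[O-]" then
      PySem.List.insert compounds (idx + 1) compound
    else fixCarbLoop compounds rest compound

def fix_carbonates (compound_smiles : String) : String :=
  -- compounds = compound_smiles.split(".")  (sep "." ≠ "": split? is some)
  PySem.Str.join "."
    (fixCarbLoop ((PySem.Str.split? compound_smiles ".").getD [])
      (PySem.List.enumerate ((PySem.Str.split? compound_smiles ".").getD []) 0) "")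

-- ===== PORT B =====
def pvCarbChars : List Char := "O=C([O-])[O-]".toList

-- Source B's while loop over (done, rest); rest.partition(".") is ported by hand as
-- (takeWhile (≠'.'), dropWhile (≠'.')): exact for the single-character separator "."
def fixAltGo (done rest : List Char) : List Char :=
  match h : rest.dropWhile (fun c => !(c == '.')) with
  | [] => done ++ rest                                   -- sep == "": return done + rest
  | _ :: tail =>
    let head := rest.takeWhile (fun c => !(c == '.'))
    if head = pvCarbChars then                           -- head == carbonate
      -- return done + head + "." + nxt + "." + nxt + sep2 + more
      done ++ head ++ '.' :: tail.takeWhile (fun c => !(c == '.')) ++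
        '.' :: tail.takeWhile (fun c => !(c == '.')) ++ tail.dropWhile (fun c => !(c == '.'))
    else fixAltGo (done ++ head ++ ['.']) tail           -- done += head + "."; rest = tail
termination_by rest.length
decreasing_by
  have hs := List.Sublist.length_le (List.dropWhile_sublist (l := rest) (fun c => !(c == '.')))
  rw [h] at hs; simp at hs; omega

def fix_carbonates_alt (compound_smiles : String) : String :=
  String.ofList (fixAltGo [] compound_smiles.toList)

-- ===== PRECONDITION & SPEC =====
def Spec_fix_carbonates (compound_smiles : String) (out : String) : Prop := out = fix_carbonates_alt compound_smiles
instance (compound_smiles : String) (out : String) : Decidable (Spec_fix_carbonates compound_smiles out) := by unfold Spec_fix_carbonates; infer_instance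

-- ===== CLAIM (what is proved, stated in full; the proofs are below) =====
def Claim_equal_fix_carbonates : Prop := ∀ (compound_smiles : String), Dom_fix_carbonates compound_smiles → Spec_fix_carbonates compound_smiles (fix_carbonates compound_smiles)

-- ===== LEMMAS AND PROOFS =====

-- the components of l, dot-separated: a structural rephrasing of splitOn l ['.']
def pvSplitAll (l : List Char) : List (List Char) :=
  match h : l.dropWhile (fun c => !(c == '.')) with
  | [] => [l]
  | _ :: t => l.takeWhile (fun c => !(c == '.')) :: pvSplitAll t
termination_by l.length
decreasing_by
  have hs := List.Sublist.length_le (List.dropWhile_sublist (l := l) (fun c => !(c == '.')))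
  rw [h] at hs; simp at hs; omega

-- prepend onto the first component ([] gets one component)
def pvHeadPre (f : List Char) : List (List Char) → List (List Char)
  | [] => [f]
  | x :: xs => (f ++ x) :: xs

-- the common fix on the component list (char level / string level)
def pvFixC : List (List Char) → List (List Char)
  | [] => []
  | [x] => [x]
  | x :: y :: r => if x = pvCarbChars then x :: y :: y :: r else x :: pvFixC (y :: r)

def pvFixS : List String → List String
  | [] => []
  | [x] => [x]
  | x :: y :: r => if x = "O=C([O-])[O-]" then x :: y :: y :: r else x :: pvFixS (y :: r)

-- where A's loop triggers: (offset, element) processed while previous = carbonate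
def pvTrig : List String → String → Option (Nat × String)
  | [], _ => none
  | x :: rest, p =>
    if p = "O=C([O-])[O-]" then some (0, x)
    else (pvTrig rest x).map (fun jy => (jy.1 + 1, jy.2))

theorem pvSplitAll_of_drop_nil (l : List Char) (h : l.dropWhile (fun c => !(c == '.')) = []) :
    pvSplitAll l = [l] := by
  rw [pvSplitAll]; split
  · rfl
  · next c t hcons => rw [h] at hcons; cases hcons

theorem pvSplitAll_of_drop_cons (l t : List Char) (c : Char)
    (h : l.dropWhile (fun c => !(c == '.')) = c :: t) :
    pvSplitAll l = l.takeWhile (fun c => !(c == '.')) :: pvSplitAll t := by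
  rw [pvSplitAll]; split
  · next hnil => rw [h] at hnil; cases hnil
  · next c' t' hcons => rw [h] at hcons; cases hcons; rfl

theorem pvSplitAll_ne_nil (l : List Char) : pvSplitAll l ≠ [] := by
  cases h : l.dropWhile (fun c => !(c == '.')) with
  | nil => rw [pvSplitAll_of_drop_nil l h]; simp
  | cons c t => rw [pvSplitAll_of_drop_cons l t c h]; simp

theorem pvHeadPre_nil (ps : List (List Char)) (h : ps ≠ []) : pvHeadPre [] ps = ps := by
  cases ps with
  | nil => exact absurd rfl h
  | cons x xs => simp [pvHeadPre]

theorem pvHeadPre_headPre (a b : List Char) (ps : List (List Char)) :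
    pvHeadPre a (pvHeadPre b ps) = pvHeadPre (a ++ b) ps := by
  cases ps <;> simp [pvHeadPre]

-- peeling one non-dot char prepends it to the first component
theorem pvSplitAll_cons_ne (c : Char) (rest : List Char) (hc : (c == '.') = false) :
    pvSplitAll (c :: rest) = pvHeadPre [c] (pvSplitAll rest) := by
  have hd : (c :: rest).dropWhile (fun c => !(c == '.')) = rest.dropWhile (fun c => !(c == '.')) := by
    simp [hc]
  have ht : (c :: rest).takeWhile (fun c => !(c == '.')) = c :: rest.takeWhile (fun c => !(c == '.')) := by
    simp [hc]
  cases h : rest.dropWhile (fun c => !(c == '.')) with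
  | nil =>
    have h0 : rest.takeWhile (fun c => !(c == '.')) = rest := by
      conv_rhs => rw [← List.takeWhile_append_dropWhile (p := fun c => !(c == '.')) (l := rest)]
      rw [h]; simp
    rw [pvSplitAll_of_drop_nil _ (by rw [hd, h]), pvSplitAll_of_drop_nil _ h]
    simp [pvHeadPre]
  | cons d t =>
    rw [pvSplitAll_of_drop_cons _ t d (by rw [hd, h]), pvSplitAll_of_drop_cons _ t d h, ht]
    simp [pvHeadPre]

theorem pvSplitAll_cons_dot (rest : List Char) :
    pvSplitAll ('.' :: rest) = [] :: pvSplitAll rest := by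
  have hd : ('.' :: rest).dropWhile (fun c => !(c == '.')) = '.' :: rest := by
    simp
  rw [pvSplitAll_of_drop_cons _ rest '.' hd]
  simp

-- splitOn's fuel loop computes pvSplitAll
theorem pvGo_spec (fuel : Nat) (l cur : List Char) (acc : List (List Char))
    (hf : l.length ≤ fuel) :
    PySem.Chars.splitOn.go ['.'] fuel l cur acc = acc.reverse ++ pvHeadPre cur.reverse (pvSplitAll l) := by
  induction fuel generalizing l cur acc with
  | zero =>
    have hl : l = [] := List.length_eq_zero_iff.mp (Nat.le_zero.mp hf)
    subst hl
    simp [PySem.Chars.splitOn.go, pvSplitAll_of_drop_nil [] rfl, pvHeadPre]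
  | succ fuel ih =>
    cases l with
    | nil => simp [PySem.Chars.splitOn.go, pvSplitAll_of_drop_nil [] rfl, pvHeadPre]
    | cons c rest =>
      by_cases hc : c = '.'
      · subst hc
        have hpre : List.isPrefixOf ['.'] ('.' :: rest) = true := by simp [List.isPrefixOf]
        rw [PySem.Chars.splitOn.go, if_pos hpre]
        have : List.drop (['.'] : List Char).length ('.' :: rest) = rest := by simp
        rw [this, ih rest [] (cur.reverse :: acc) (by simpa using Nat.lt_succ_iff.mp (by simpa using hf))]
        rw [pvSplitAll_cons_dot]
        simp only [List.reverse_nil]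
        rw [pvHeadPre_nil _ (pvSplitAll_ne_nil rest)]
        simp [pvHeadPre]
      · have hpre : List.isPrefixOf ['.'] (c :: rest) = false := by
          simp [List.isPrefixOf]; exact fun h => hc h.symm
        rw [PySem.Chars.splitOn.go, if_neg (by simp [hpre])]
        rw [ih rest (c :: cur) acc (by simpa using Nat.lt_succ_iff.mp (by simpa using hf))]
        rw [pvSplitAll_cons_ne c rest (by simpa using hc), pvHeadPre_headPre]
        simp

theorem pvSplitOn_eq (l : List Char) : PySem.Chars.splitOn l ['.'] = pvSplitAll l := by
  show PySem.Chars.splitOn.go ['.'] (l.length + 1) l [] [] = _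
  rw [pvGo_spec (l.length + 1) l [] [] (by omega)]
  simp [pvHeadPre_nil _ (pvSplitAll_ne_nil l)]

theorem pvJoin_cons (x : List Char) (ps : List (List Char)) (h : ps ≠ []) :
    PySem.Chars.join ['.'] (x :: ps) = x ++ '.' :: PySem.Chars.join ['.'] ps := by
  cases ps with
  | nil => exact absurd rfl h
  | cons q r => rw [PySem.Chars.join_cons_cons]; simp

theorem pvJoin_splitAll (l : List Char) : PySem.Chars.join ['.'] (pvSplitAll l) = l := by
  cases h : l.dropWhile (fun c => !(c == '.')) with
  | nil => rw [pvSplitAll_of_drop_nil l h, PySem.Chars.join_singleton]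
  | cons c t =>
    have hc : (!(c == '.')) = false := by
      have := List.head?_dropWhile_not (fun c => !(c == '.')) l
      rw [h] at this; simpa using this
    have hc' : c = '.' := by simpa using hc
    rw [pvSplitAll_of_drop_cons l t c h, pvJoin_cons _ _ (pvSplitAll_ne_nil t),
        pvJoin_splitAll t]
    conv_rhs => rw [← List.takeWhile_append_dropWhile (p := fun c => !(c == '.')) (l := l), h, hc']
termination_by l.length
decreasing_by
  have hs := List.Sublist.length_le (List.dropWhile_sublist (l := l) (fun c => !(c == '.')))
  rw [h] at hs; simp at hs; omega

theorem pvFixC_ne_nil (ps : List (List Char)) (h : ps ≠ []) : pvFixC ps ≠ [] := by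
  match ps with
  | [] => exact absurd rfl h
  | [x] => simp [pvFixC]
  | x :: y :: r =>
    unfold pvFixC; split_ifs <;> simp

theorem pvSplitAll_head (t : List Char) :
    ∃ r, pvSplitAll t = t.takeWhile (fun c => !(c == '.')) :: r := by
  cases h : t.dropWhile (fun c => !(c == '.')) with
  | nil =>
    refine ⟨[], ?_⟩
    rw [pvSplitAll_of_drop_nil t h]
    have : t.takeWhile (fun c => !(c == '.')) = t := by
      conv_rhs => rw [← List.takeWhile_append_dropWhile (p := fun c => !(c == '.')) (l := t)]
      rw [h]; simp
    rw [this]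
  | cons c r => exact ⟨pvSplitAll r, pvSplitAll_of_drop_cons t r c h⟩

-- B's streaming loop computes the fixed component list, joined
theorem pvFixAltGo_spec (l done : List Char) :
    fixAltGo done l = done ++ PySem.Chars.join ['.'] (pvFixC (pvSplitAll l)) := by
  cases h : l.dropWhile (fun c => !(c == '.')) with
  | nil =>
    rw [fixAltGo]
    split
    · rw [pvSplitAll_of_drop_nil l h]
      simp [pvFixC, PySem.Chars.join_singleton]
    · next c t hcons => rw [h] at hcons; cases hcons
  | cons c tail =>
    rw [fixAltGo]
    split
    · next hnil => rw [h] at hnil; cases hnil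
    · next c' tail' hcons =>
      rw [h] at hcons; cases hcons
      rw [pvSplitAll_of_drop_cons l tail c h]
      obtain ⟨r, hr⟩ := pvSplitAll_head tail
      by_cases hcarb : l.takeWhile (fun c => !(c == '.')) = pvCarbChars
      · rw [if_pos hcarb, hr]
        unfold pvFixC
        rw [if_pos hcarb]
        rw [pvJoin_cons _ _ (by simp), pvJoin_cons _ _ (by simp), ← hr, pvJoin_splitAll tail]
        conv_rhs => rw [show tail = tail.takeWhile (fun c => !(c == '.')) ++ tail.dropWhile (fun c => !(c == '.')) from (List.takeWhile_append_dropWhile).symm]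
        simp
      · rw [if_neg hcarb]
        rw [pvFixAltGo_spec tail (done ++ l.takeWhile (fun c => !(c == '.')) ++ ['.'])]
        rw [hr]
        have hfold : pvFixC (l.takeWhile (fun c => !(c == '.')) :: tail.takeWhile (fun c => !(c == '.')) :: r) =
            l.takeWhile (fun c => !(c == '.')) :: pvFixC (tail.takeWhile (fun c => !(c == '.')) :: r) := by
          simp only [pvFixC]; rw [if_neg hcarb]
        rw [hfold, pvJoin_cons _ _ (pvFixC_ne_nil _ (by simp)), ← hr]
        simp
termination_by l.length
decreasing_by
  have hs := List.Sublist.length_le (List.dropWhile_sublist (l := l) (fun c => !(c == '.')))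
  rw [h] at hs; simp at hs; omega

-- string-level fix commutes with toList
theorem pvFix_map (ps : List String) : (pvFixS ps).map String.toList = pvFixC (ps.map String.toList) := by
  match ps with
  | [] => simp [pvFixS, pvFixC]
  | [x] => simp [pvFixS, pvFixC]
  | x :: y :: r =>
    have hiff : (x = "O=C([O-])[O-]") ↔ (x.toList = pvCarbChars) :=
      ⟨fun h => by rw [h]; rfl, fun h => String.toList_inj.mp h⟩
    simp only [pvFixS, pvFixC, List.map_cons]
    by_cases hx : x = "O=C([O-])[O-]"
    · rw [if_pos hx, if_pos (hiff.mp hx)]; simp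
    · rw [if_neg hx, if_neg (fun hc => hx (hiff.mpr hc))]
      have hrec := pvFix_map (y :: r)
      simp only [List.map_cons] at hrec
      simp [hrec]

theorem pvTrig_some_lt (suf : List String) (p : String) (j : Nat) (y : String)
    (h : pvTrig suf p = some (j, y)) : j < suf.length := by
  induction suf generalizing p j y with
  | nil => simp [pvTrig] at h
  | cons x rest ih =>
    by_cases hp : p = "O=C([O-])[O-]"
    · simp only [pvTrig, if_pos hp, Option.some_inj] at h
      cases h
      simp
    · simp only [pvTrig, if_neg hp, Option.map_eq_some_iff] at h
      obtain ⟨⟨j', y'⟩, hrec, heq⟩ := h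
      have := ih x j' y' hrec
      simp only [Prod.mk.injEq] at heq
      simp only [List.length_cons]
      omega

theorem fixCarbLoop_eq_trig (compounds suf : List String) (k : Int) (p : String) :
    fixCarbLoop compounds (PySem.List.enumerate suf k) p =
      match pvTrig suf p with
      | some (j, y) => PySem.List.insert compounds (k + j + 1) y
      | none => compounds := by
  induction suf generalizing k p with
  | nil => simp [PySem.List.enumerate_nil, fixCarbLoop, pvTrig]
  | cons x rest ih =>
    rw [PySem.List.enumerate_cons]
    by_cases hp : p = "O=C([O-])[O-]"
    · simp [fixCarbLoop, hp, pvTrig]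
    · simp only [fixCarbLoop, beq_iff_eq, if_neg hp, pvTrig]
      rw [ih (k + 1) x]
      cases h : pvTrig rest x with
      | none => simp
      | some jy =>
        obtain ⟨j, y⟩ := jy
        simp only [Option.map_some]
        have : k + 1 + (j : Int) + 1 = k + ((j : Nat) + 1 : Nat) + 1 := by push_cast; ring
        rw [this]

-- A's insert into x :: rest at a shifted positive position is x :: (insert into rest)
theorem pvInsert_cons_succ (x : String) (rest : List String) (n : Nat) (v : String)
    (hn : n ≤ rest.length) :
    PySem.List.insert (x :: rest) ((n : Int) + 1) v = x :: PySem.List.insert rest (n : Int) v := by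
  have h1 : ((n : Int) + 1) = ((n + 1 : Nat) : Int) := by push_cast; ring
  rw [h1, PySem.List.insert_natCast _ _ _ (by simpa using hn),
      PySem.List.insert_natCast _ _ _ hn]
  simp

-- the loop's outcome equals pvFixS (incoming previous ≠ carbonate)
theorem pvMainS (parts : List String) (p : String) (hp : p ≠ "O=C([O-])[O-]") :
    (match pvTrig parts p with
     | some (j, y) => PySem.List.insert parts ((0 : Int) + j + 1) y
     | none => parts) = pvFixS parts := by
  induction parts generalizing p with
  | nil => simp [pvTrig, pvFixS]
  | cons x rest ih =>
    have hstep : pvTrig (x :: rest) p = (pvTrig rest x).map (fun jy => (jy.1 + 1, jy.2)) := by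
      simp [pvTrig, hp]
    by_cases hx : x = "O=C([O-])[O-]"
    · subst hx
      cases rest with
      | nil =>
        rw [hstep]
        show ["O=C([O-])[O-]"] = pvFixS ["O=C([O-])[O-]"]
        simp [pvFixS]
      | cons y r =>
        rw [hstep]
        show PySem.List.insert ("O=C([O-])[O-]" :: y :: r) ((0 : Int) + ((0 + 1 : Nat) : Int) + 1) y =
          pvFixS ("O=C([O-])[O-]" :: y :: r)
        rw [show ((0 : Int) + ((0 + 1 : Nat) : Int) + 1) = ((2 : Nat) : Int) from by norm_num,
            PySem.List.insert_natCast _ _ _ (by simp)]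
        unfold pvFixS
        rw [if_pos rfl]
        simp
    · cases rest with
      | nil =>
        rw [hstep]
        simp [pvTrig, pvFixS]
      | cons y r =>
        have hfix : pvFixS (x :: y :: r) = x :: pvFixS (y :: r) := by
          rw [show pvFixS (x :: y :: r) =
                if x = "O=C([O-])[O-]" then x :: y :: y :: r else x :: pvFixS (y :: r) from rfl,
              if_neg hx]
        rw [hfix, hstep]
        cases h : pvTrig (y :: r) x with
        | none =>
          show (x :: y :: r : List String) = x :: pvFixS (y :: r)
          have hrest : (y :: r : List String) = pvFixS (y :: r) := by
            have := ih x hx; rw [h] at this; exact this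
          rw [← hrest]
        | some jy =>
          obtain ⟨j, z⟩ := jy
          show PySem.List.insert (x :: y :: r) ((0 : Int) + ((j + 1 : Nat) : Int) + 1) z = x :: pvFixS (y :: r)
          have hj := pvTrig_some_lt (y :: r) x j z h
          have hrest : PySem.List.insert (y :: r) ((0 : Int) + (j : Int) + 1) z = pvFixS (y :: r) := by
            have := ih x hx; rw [h] at this; exact this
          rw [show ((0 : Int) + ((j + 1 : Nat) : Int) + 1) = ((j + 1 : Nat) : Int) + 1 from by
                push_cast; ring,
              pvInsert_cons_succ x (y :: r) (j + 1) z (by simpa using hj)]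
          congr 1
          rw [← hrest]
          congr 1
          push_cast; ring

-- the split list of A, mapped to char level, is pvSplitAll
theorem pvParts_map (s : String) :
    ((PySem.Str.split? s ".").getD []).map String.toList = pvSplitAll s.toList := by
  have h1 := PySem.Str.split?_map s "."
  have h2 : PySem.Chars.split? s.toList (".".toList) = some (PySem.Chars.splitOn s.toList ['.']) := by
    simp [PySem.Chars.split?]
  rw [h2] at h1
  cases h3 : PySem.Str.split? s "." with
  | none => rw [h3] at h1; simp at h1
  | some q =>
    rw [h3] at h1
    simp only [Option.map_some, Option.some_inj] at h1
    simp only [Option.getD_some]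
    rw [h1, pvSplitOn_eq]

-- ===== VERDICT (by name: the statement is the Claim_ definition above) =====
theorem fix_carbonates_spec : Claim_equal_fix_carbonates := by
  intro s _
  unfold Spec_fix_carbonates fix_carbonates fix_carbonates_alt
  rw [fixCarbLoop_eq_trig, pvMainS _ "" (by decide)]
  apply String.toList_inj.mp
  rw [PySem.Str.toList_join, pvFix_map, pvParts_map, pvFixAltGo_spec]
  simp
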